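-- pv_equiv track=rewrite | github.com/southpawriter02/docstratum | src/docstratum/parser/classifier.py | _count_h1_headings
-- ===== SOURCE A (Python) =====
-- def _count_h1_headings(raw_content: str) -> int:
--     """Count H1 headings in raw content.
--
--     Counts lines that start with '# ' (single hash + space).
--     Lines starting with '## ' or '### ' are NOT counted.
--     Lines inside code fences are NOT counted.
--
--     Args:
--         raw_content: The complete raw file text.
--
--     Returns:
--         Number of H1 headings found.
--     """
--     count = 0
--     in_code_block = False
--     for line in raw_content.splitlines():
--         if line.startswith("```"):
--             in_code_block = not in_code_block
--             continue
--         if not in_code_block and line.startswith("# ") and not line.startswith("## "):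
--             count += 1
--     return count
-- ===== SOURCE B (Python) =====
-- def _count_h1_headings(raw_content: str) -> int:
--     segments = []
--     current = []
--     for line in raw_content.splitlines():
--         if line.startswith("```"):
--             segments.append(current)
--             current = []
--         else:
--             current.append(line)
--     segments.append(current)
--     total = 0
--     for i, seg in enumerate(segments):
--         if i % 2 == 0:
--             total += sum(1 for line in seg if line.startswith("# "))
--     return total
-- ===== Notes on version B (the rewrite author's own statement) =====
-- stated objective: alternative
-- what changed: Replaces the stateful in_code_block boolean toggle (and its redundant '## ' re-check) with a group-then-count decomposition: lines are split into fence-delimited segments and H1 lines are counted only in even-indexed (outside-code) segments.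
import Mathlib
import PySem

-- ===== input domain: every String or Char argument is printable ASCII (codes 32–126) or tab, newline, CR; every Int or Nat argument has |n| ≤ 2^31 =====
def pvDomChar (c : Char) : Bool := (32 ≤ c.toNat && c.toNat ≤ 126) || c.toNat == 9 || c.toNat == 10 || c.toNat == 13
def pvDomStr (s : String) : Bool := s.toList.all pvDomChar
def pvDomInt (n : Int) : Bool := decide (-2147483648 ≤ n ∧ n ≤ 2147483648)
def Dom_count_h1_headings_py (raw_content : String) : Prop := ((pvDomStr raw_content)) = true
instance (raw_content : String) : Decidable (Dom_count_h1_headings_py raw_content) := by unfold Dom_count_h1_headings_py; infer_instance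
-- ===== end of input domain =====

-- B replaces A's in_code_block boolean toggle (and its redundant '## ' re-check) by a
-- group-then-count decomposition: split the lines at fences into segments, then count
-- '# ' lines in the even-indexed segments; objective: alternative (same cost).

-- ===== PORT A =====
def aStep (st : Int × Bool) (line : String) : Int × Bool :=
  if PySem.Str.startswith line "```" then (st.1, !st.2)
  else if (!st.2 && PySem.Str.startswith line "# " && !(PySem.Str.startswith line "## ")) then
    (st.1 + 1, st.2)
  else st

def count_h1_headings_py (raw_content : String) : Int :=
  ((PySem.Str.splitlines raw_content).foldl aStep (0, false)).1

-- ===== PORT B =====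
-- sum(1 for line in seg if line.startswith("# ")) = number of matching lines
def h1CountSeg (seg : List String) : Int :=
  (seg.countP (fun l => PySem.Str.startswith l "# ") : Int)

def bStep (st : List (List String) × List String) (line : String) :
    List (List String) × List String :=
  if PySem.Str.startswith line "```" then (st.1 ++ [st.2], ([] : List String))
  else (st.1, st.2 ++ [line])

def count_h1_headings_py_alt (raw_content : String) : Int :=
  let st := (PySem.Str.splitlines raw_content).foldl bStep ([], [])
  let segments := st.1 ++ [st.2]
  (PySem.List.enumerate segments 0).foldl
    (fun t p => if PySem.Int.mod p.1 2 = 0 then t + h1CountSeg p.2 else t) 0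

-- ===== PRECONDITION & SPEC =====
def Spec_count_h1_headings_py (raw_content : String) (out : Int) : Prop := out = count_h1_headings_py_alt raw_content
instance (raw_content : String) (out : Int) : Decidable (Spec_count_h1_headings_py raw_content out) := by unfold Spec_count_h1_headings_py; infer_instance

-- ===== CLAIM (what is proved, stated in full; the proofs are below) =====
def Claim_equal_count_h1_headings_py : Prop := ∀ (raw_content : String), Dom_count_h1_headings_py raw_content → Spec_count_h1_headings_py raw_content (count_h1_headings_py raw_content)

-- ===== LEMMAS AND PROOFS =====

-- reference count: A's loop as a structural recursion over the lines
def gA : Bool → List String → Int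
  | _, [] => 0
  | b, l :: ls =>
    if PySem.Str.startswith l "```" then gA (!b) ls
    else (if (!b && PySem.Str.startswith l "# " && !(PySem.Str.startswith l "## ")) then 1 else 0)
         + gA b ls

theorem foldA_eq (ls : List String) : ∀ (c : Int) (b : Bool),
    (ls.foldl aStep (c, b)).1 = c + gA b ls := by
  induction ls with
  | nil => intro c b; simp [gA]
  | cons l ls ih =>
    intro c b
    by_cases hf : PySem.Chars.startswith l.toList ['`','`','`'] = true
    · simp [aStep, gA, hf, ih]
    · by_cases h1 : PySem.Chars.startswith l.toList ['#',' '] = true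
      · by_cases h2 : PySem.Chars.startswith l.toList ['#','#',' '] = true
        · simp [aStep, gA, hf, h1, h2, ih]
        · by_cases hb : b = true
          · simp [aStep, gA, hf, h1, h2, hb, ih]
          · simp only [Bool.not_eq_true] at hb
            simp [aStep, gA, hf, h1, h2, hb, ih]
            ring
      · simp [aStep, gA, hf, h1, ih]

-- B's segment construction as a structural recursion
def mkSegs (cur : List String) : List String → List (List String) × List String
  | [] => ([], cur)
  | l :: ls =>
    if PySem.Str.startswith l "```" then
      let r := mkSegs [] ls
      (cur :: r.1, r.2)
    else mkSegs (cur ++ [l]) ls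

theorem foldB_eq (ls : List String) : ∀ (segs : List (List String)) (cur : List String),
    ls.foldl bStep (segs, cur) = (segs ++ (mkSegs cur ls).1, (mkSegs cur ls).2) := by
  induction ls with
  | nil => intro segs cur; simp [mkSegs]
  | cons l ls ih =>
    intro segs cur
    by_cases hf : PySem.Chars.startswith l.toList ['`','`','`'] = true
    · simp [bStep, mkSegs, hf, ih]
    · simp [bStep, mkSegs, hf, ih]

-- counting '# ' lines in alternating segments (p = current segment is outside code)
def segCount : Bool → List (List String) → Int
  | _, [] => 0
  | p, s :: ss => (if p then h1CountSeg s else 0) + segCount (!p) ss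

theorem h1CountSeg_append (seg : List String) (l : String) :
    h1CountSeg (seg ++ [l])
      = h1CountSeg seg + (if PySem.Str.startswith l "# " then 1 else 0) := by
  by_cases h : PySem.Chars.startswith l.toList ['#',' '] = true <;>
    simp [h1CountSeg, List.countP_append, h]

theorem enumFold_eq (ss : List (List String)) : ∀ (n : Nat) (t : Int),
    (PySem.List.enumerate ss (n : Int)).foldl
        (fun t p => if PySem.Int.mod p.1 2 = 0 then t + h1CountSeg p.2 else t) t
      = t + segCount (n % 2 == 0) ss := by
  induction ss with
  | nil => intro n t; simp [PySem.List.enumerate_nil, segCount]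
  | cons s ss ih =>
    intro n t
    rw [PySem.List.enumerate_cons]
    have hcast : ((n : Int) + 1) = ((n + 1 : Nat) : Int) := by push_cast; ring
    have hmod : PySem.Int.mod (n : Int) 2 = ((n % 2 : Nat) : Int) := by
      exact_mod_cast PySem.Int.mod_natCast n 2
    simp only [List.foldl_cons, hcast, hmod, ih, segCount]
    by_cases hp : n % 2 = 0
    · have hz : ((n % 2 : Nat) : Int) = 0 := by exact_mod_cast hp
      have e1 : ((n % 2 == 0) : Bool) = true := by simp [hp]
      have e2 : (((n + 1) % 2 == 0) : Bool) = false := by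
        have h1 : (n + 1) % 2 = 1 := by omega
        simp [h1]
      rw [if_pos hz, e1, e2]
      simp
      ring
    · have hz : ¬ (((n % 2 : Nat) : Int) = 0) := by exact_mod_cast hp
      have e1 : ((n % 2 == 0) : Bool) = false := by simp [hp]
      have e2 : (((n + 1) % 2 == 0) : Bool) = true := by
        have h1 : (n + 1) % 2 = 0 := by omega
        simp [h1]
      rw [if_neg hz, e1, e2]
      simp

-- a line starting with "# " cannot start with "## "
theorem not_startswith_hh (l : List Char) (h : PySem.Chars.startswith l ['#',' '] = true) :
    PySem.Chars.startswith l ['#','#',' '] = false := by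
  rw [PySem.Chars.startswith_iff] at h
  by_contra hc
  rw [Bool.not_eq_false, PySem.Chars.startswith_iff] at hc
  obtain ⟨t1, h1⟩ := h
  obtain ⟨t2, h2⟩ := hc
  have : (['#',' '] ++ t1)[1]? = (['#','#',' '] ++ t2)[1]? := by rw [h1, h2]
  simp at this

-- main bridge: alternating count of the segments built from ls equals A's reference count
theorem segCount_mkSegs (ls : List String) : ∀ (cur : List String) (p : Bool),
    segCount p ((mkSegs cur ls).1 ++ [(mkSegs cur ls).2])
      = (if p then h1CountSeg cur else 0) + gA (!p) ls := by
  induction ls with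
  | nil => intro cur p; simp [mkSegs, segCount, gA]
  | cons l ls ih =>
    intro cur p
    by_cases hf : PySem.Chars.startswith l.toList ['`','`','`'] = true
    · simp [mkSegs, gA, segCount, hf, ih [] (!p), h1CountSeg]
    · by_cases hp : p = true
      · by_cases h1 : PySem.Chars.startswith l.toList ['#',' '] = true
        · have h2 := not_startswith_hh l.toList h1
          simp [mkSegs, gA, hf, hp, h1, h2, ih (cur ++ [l]) true, h1CountSeg_append]
          ring
        · simp [mkSegs, gA, hf, hp, h1, ih (cur ++ [l]) true, h1CountSeg_append]
      · simp only [Bool.not_eq_true] at hp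
        simp [mkSegs, gA, hf, hp, ih (cur ++ [l]) false]

-- ===== VERDICT (by name: the statement is the Claim_ definition above) =====
theorem count_h1_headings_py_spec : Claim_equal_count_h1_headings_py := by
  intro raw _
  unfold Spec_count_h1_headings_py count_h1_headings_py count_h1_headings_py_alt
  simp only []
  rw [foldA_eq, foldB_eq]
  have h := enumFold_eq ((mkSegs [] (PySem.Str.splitlines raw)).1 ++ [(mkSegs [] (PySem.Str.splitlines raw)).2]) 0 0
  simp only [Nat.cast_zero, Nat.zero_mod] at h
  simp only [List.nil_append]
  rw [h, show ((0 == 0) : Bool) = true from rfl, segCount_mkSegs]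
  simp [h1CountSeg]
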